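-- pv_equiv track=rewrite | github.com/Nagillimi/Skiing-Logging | PROCESSING/signal_processing.py | groupClosePointsIntoRanges
-- ===== SOURCE A (Python) =====
-- def groupClosePointsIntoRanges(idxs, th=2):
--     """Return list of ranges of sequential points grouped by closeness,
--     whose changes are separated by values greater than `th`
--     """
--     ranges = []
--     if len(idxs) == 0:
--         return ranges
--     x1 = idxs[0]
--     x2 = idxs[-1]
--     for i in range(len(idxs) - 1):
--         if idxs[i + 1] - idxs[i] > th:
--             ranges.append([x1, idxs[i]])
--             x1 = idxs[i + 1]
--     ranges.append([x1, x2])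
--     return ranges
-- ===== SOURCE B (Python) =====
-- def groupClosePointsIntoRanges(idxs, th=2):
--     """Group sequential points into [start, end] ranges split where the gap exceeds th."""
--     if len(idxs) == 0:
--         return []
--     breaks = [i for i in range(len(idxs) - 1) if idxs[i + 1] - idxs[i] > th]
--     starts = [idxs[0]] + [idxs[b + 1] for b in breaks]
--     ends = [idxs[b] for b in breaks] + [idxs[-1]]
--     return [[s, e] for s, e in zip(starts, ends)]
-- ===== Notes on version B (the rewrite author's own statement) =====
-- stated objective: alternative
-- what changed: Replaces the inline running-start accumulator loop with a two-pass boundary construction: first collect break positions, then zip the derived start and end lists into ranges.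
import Mathlib
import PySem

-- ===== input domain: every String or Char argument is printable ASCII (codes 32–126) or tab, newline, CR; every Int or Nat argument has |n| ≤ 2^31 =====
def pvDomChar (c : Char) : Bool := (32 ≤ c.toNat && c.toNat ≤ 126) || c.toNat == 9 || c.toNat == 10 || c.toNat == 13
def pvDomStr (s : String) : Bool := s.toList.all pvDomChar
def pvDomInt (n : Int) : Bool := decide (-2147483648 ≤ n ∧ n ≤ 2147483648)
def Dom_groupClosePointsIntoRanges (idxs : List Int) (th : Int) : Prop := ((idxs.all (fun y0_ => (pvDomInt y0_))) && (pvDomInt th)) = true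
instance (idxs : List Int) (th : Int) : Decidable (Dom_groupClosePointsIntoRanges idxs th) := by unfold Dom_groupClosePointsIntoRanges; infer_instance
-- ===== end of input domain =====

-- B replaces the running-start accumulator loop with a two-pass construction
-- (collect break positions, then zip derived start/end lists); alternative, same cost.


-- ===== PORT A =====
-- every index access in A is in range (idxs nonempty, i < len-1), so getD is exact
def groupClosePointsIntoRanges (idxs : List Int) (th : Int) : List (List Int) :=
  if idxs.length = 0 then []
  else
    let x2 := idxs.getD (idxs.length - 1) 0
    let st := (List.range (idxs.length - 1)).foldl
      (fun (st : List (List Int) × Int) i =>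
        if idxs.getD (i + 1) 0 - idxs.getD i 0 > th then
          (st.1 ++ [[st.2, idxs.getD i 0]], idxs.getD (i + 1) 0)
        else st)
      ([], idxs.getD 0 0)
    st.1 ++ [[st.2, x2]]

-- ===== PORT B =====
def groupClosePointsIntoRanges_alt (idxs : List Int) (th : Int) : List (List Int) :=
  if idxs.length = 0 then []
  else
    let breaks := (List.range (idxs.length - 1)).filter
      (fun i => idxs.getD (i + 1) 0 - idxs.getD i 0 > th)
    let starts := idxs.getD 0 0 :: breaks.map (fun b => idxs.getD (b + 1) 0)
    let ends := breaks.map (fun b => idxs.getD b 0) ++ [idxs.getD (idxs.length - 1) 0]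
    (starts.zip ends).map (fun p => [p.1, p.2])

-- ===== PRECONDITION & SPEC =====
def Spec_groupClosePointsIntoRanges (idxs : List Int) (th : Int) (out : List (List Int)) : Prop := out = groupClosePointsIntoRanges_alt idxs th
instance (idxs : List Int) (th : Int) (out : List (List Int)) : Decidable (Spec_groupClosePointsIntoRanges idxs th out) := by unfold Spec_groupClosePointsIntoRanges; infer_instance

-- ===== CLAIM (what is proved, stated in full; the proofs are below) =====
def Claim_equal_groupClosePointsIntoRanges : Prop := ∀ (idxs : List Int) (th : Int), Dom_groupClosePointsIntoRanges idxs th → Spec_groupClosePointsIntoRanges idxs th (groupClosePointsIntoRanges idxs th)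

-- ===== LEMMAS AND PROOFS =====

-- chain of ranges generated from a list of break positions, starting at x1
def gAux (idxs : List Int) (x1 : Int) : List Nat → List (List Int) × Int
  | [] => ([], x1)
  | b :: bs =>
    let r := gAux idxs (idxs.getD (b + 1) 0) bs
    ([x1, idxs.getD b 0] :: r.1, r.2)

theorem foldlA_eq (idxs : List Int) (th : Int) :
    ∀ (L : List Nat) (ranges : List (List Int)) (x1 : Int),
      L.foldl
        (fun (st : List (List Int) × Int) i =>
          if idxs.getD (i + 1) 0 - idxs.getD i 0 > th then
            (st.1 ++ [[st.2, idxs.getD i 0]], idxs.getD (i + 1) 0)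
          else st)
        (ranges, x1)
      = (ranges ++ (gAux idxs x1 (L.filter (fun i => idxs.getD (i + 1) 0 - idxs.getD i 0 > th))).1,
         (gAux idxs x1 (L.filter (fun i => idxs.getD (i + 1) 0 - idxs.getD i 0 > th))).2) := by
  intro L
  induction L with
  | nil => intro ranges x1; simp [gAux]
  | cons b bs ih =>
    intro ranges x1
    by_cases h : idxs.getD (b + 1) 0 - idxs.getD b 0 > th
    · simp only [List.foldl_cons, List.filter_cons, decide_eq_true_eq, h,
        if_true, gAux]
      rw [ih]
      simp
    · simp only [List.foldl_cons, List.filter_cons, decide_eq_true_eq, h,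
        if_false]
      rw [ih]

theorem zip_eq (idxs : List Int) (x2 : Int) :
    ∀ (bs : List Nat) (x1 : Int),
      (((x1 :: bs.map (fun b => idxs.getD (b + 1) 0)).zip
        (bs.map (fun b => idxs.getD b 0) ++ [x2])).map (fun p => [p.1, p.2]))
      = (gAux idxs x1 bs).1 ++ [[(gAux idxs x1 bs).2, x2]] := by
  intro bs
  induction bs with
  | nil => intro x1; simp [gAux]
  | cons b bs ih =>
    intro x1
    simp only [List.map_cons, List.cons_append, List.zip_cons_cons, gAux]
    rw [ih]

-- ===== VERDICT (by name: the statement is the Claim_ definition above) =====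
theorem groupClosePointsIntoRanges_spec : Claim_equal_groupClosePointsIntoRanges := by
  intro idxs th _
  unfold Spec_groupClosePointsIntoRanges groupClosePointsIntoRanges groupClosePointsIntoRanges_alt
  by_cases h : idxs.length = 0
  · simp [h]
  · simp only [if_neg h]
    rw [foldlA_eq idxs th (List.range (idxs.length - 1)) [] (idxs.getD 0 0)]
    rw [zip_eq idxs (idxs.getD (idxs.length - 1) 0)
      ((List.range (idxs.length - 1)).filter (fun i => idxs.getD (i + 1) 0 - idxs.getD i 0 > th))
      (idxs.getD 0 0)]
    simp
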